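-- pv_equiv track=rewrite | github.com/CasonL/SalesTrainerAI | CLEANSalesAgentProject/chat-routes.py | extract_product_service
-- ===== SOURCE A (Python) =====
-- def extract_product_service(message):
--     """Extract product or service information from message."""
--     # This is a simplified extraction - in real app would use better NLP
--     message = message.lower()
--
--     # Look for selling indicators
--     selling_indicators = [
--         'selling', 'offer', 'promote', 'market', 'sell', 'product is', 'service is',
--         'i sell', 'we sell', 'i\'m selling', 'we\'re selling'
--     ]
--
--     for indicator in selling_indicators:
--         if indicator in message:
--             # Extract what comes after the indicator
--             parts = message.split(indicator, 1)
--             if len(parts) > 1 and parts[1].strip():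
--                 # Extract up to 50 chars or until end of sentence
--                 product_text = parts[1].strip()
--                 end_markers = ['.', '!', '?', ',', '\n']
--                 for marker in end_markers:
--                     if marker in product_text:
--                         product_text = product_text.split(marker, 1)[0]
--
--                 return product_text[:50].strip()
--
--     return None
-- ===== SOURCE B (Python) =====
-- def extract_product_service(message):
--     """Extract product or service information from message."""
--     message = message.lower()
--
--     selling_indicators = [
--         'selling', 'offer', 'promote', 'market', 'sell', 'product is', 'service is',
--         'i sell', 'we sell', 'i\'m selling', 'we\'re selling'
--     ]
--     markers = '.!?,\n'
--
--     for indicator in selling_indicators: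
--         pos = message.find(indicator)
--         if pos < 0:
--             continue
--         tail = message[pos + len(indicator):].strip()
--         if not tail:
--             continue
--         cut = next((i for i, ch in enumerate(tail) if ch in markers), len(tail))
--         return tail[:cut][:50].strip()
--     return None
-- ===== Notes on version B (the rewrite author's own statement) =====
-- stated objective: simpler
-- what changed: B replaces A's split(indicator,1) and its loop of repeated split(marker,1) truncations by a single find of the indicator plus one first-end-marker-index computation (next over enumerate), returning tail[:cut][:50].strip() directly.
import Mathlib
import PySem

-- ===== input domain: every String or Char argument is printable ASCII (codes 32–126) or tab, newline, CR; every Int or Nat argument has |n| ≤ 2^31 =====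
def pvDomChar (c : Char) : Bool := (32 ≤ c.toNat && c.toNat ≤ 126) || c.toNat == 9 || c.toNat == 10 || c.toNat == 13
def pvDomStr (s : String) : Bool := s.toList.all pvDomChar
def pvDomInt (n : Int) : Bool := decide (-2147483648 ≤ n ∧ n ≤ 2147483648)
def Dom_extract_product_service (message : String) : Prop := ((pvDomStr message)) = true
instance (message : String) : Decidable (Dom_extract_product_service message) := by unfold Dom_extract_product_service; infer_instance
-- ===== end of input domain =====

-- B replaces A's split-by-indicator and repeated split-by-each-end-marker loop by a single
-- find + first-end-marker-index computation; objective: simpler, same return value everywhere.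

-- ===== PORT A =====
-- the selling_indicators literal (shared data; both Pythons carry the same literal)
def pvIndicators : List (List Char) :=
  ["selling".toList, "offer".toList, "promote".toList, "market".toList, "sell".toList,
   "product is".toList, "service is".toList, "i sell".toList, "we sell".toList,
   "i'm selling".toList, "we're selling".toList]

-- A's end_markers list
def pvEndMarkers : List (List Char) := [['.'], ['!'], ['?'], [','], ['\n']]

-- A's inner loop: `for marker in end_markers: if marker in product_text: product_text = product_text.split(marker, 1)[0]`
def pvTrimA (pt : List Char) : List Char :=
  pvEndMarkers.foldl (fun pt mk =>
    if PySem.Chars.isIn mk pt = true then (PySem.Chars.splitOnMax pt mk 1).headD [] else pt) pt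

-- A's `for indicator in selling_indicators` loop
def pvLoopA : List (List Char) → List Char → Option String
  | [], _ => none
  | ind :: rest, m =>
    if PySem.Chars.isIn ind m = true then
      let parts := PySem.Chars.splitOnMax m ind 1
      if 1 < parts.length ∧ PySem.Chars.strip (parts.getD 1 []) ≠ [] then
        let productText := PySem.Chars.strip (parts.getD 1 [])
        some (String.ofList (PySem.Chars.strip (PySem.List.slice (pvTrimA productText) none (some 50))))
      else pvLoopA rest m
    else pvLoopA rest m

def extract_product_service (message : String) : Option String :=
  pvLoopA pvIndicators (PySem.Chars.lower message.toList)

-- ===== PORT B =====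
-- Source B's markers string '.!?,\n'
def pvMarkers : List Char := ['.', '!', '?', ',', '\n']

-- Source B's loop: find the indicator, slice off the tail (`message[pos+len(ind):]` with a nonnegative
-- index is exactly List.drop), take everything before the first end marker
-- (`next((i for i,ch in enumerate(tail) if ch in markers), len(tail))` is exactly List.findIdx),
-- then `tail[:cut][:50]` with nonnegative bounds is exactly List.take.
def pvLoopB : List (List Char) → List Char → Option String
  | [], _ => none
  | ind :: rest, m =>
    let pos := PySem.Chars.find m ind
    if pos < 0 then pvLoopB rest m
    else
      let tail := PySem.Chars.strip (m.drop (pos.toNat + ind.length))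
      if tail = [] then pvLoopB rest m
      else
        let cut := tail.findIdx (fun c => pvMarkers.contains c)
        some (String.ofList (PySem.Chars.strip ((tail.take cut).take 50)))

def extract_product_service_alt (message : String) : Option String :=
  pvLoopB pvIndicators (PySem.Chars.lower message.toList)

-- ===== PRECONDITION & SPEC =====
def Spec_extract_product_service (message : String) (out : Option String) : Prop := out = extract_product_service_alt message
instance (message : String) (out : Option String) : Decidable (Spec_extract_product_service message out) := by unfold Spec_extract_product_service; infer_instance

-- ===== CLAIM (what is proved, stated in full; the proofs are below) =====
def Claim_equal_extract_product_service : Prop := ∀ (message : String), Dom_extract_product_service message → Spec_extract_product_service message (extract_product_service message)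

-- ===== LEMMAS AND PROOFS =====

-- find points at j as soon as j is a minimal occurrence of sub in l
theorem pv_find_eq (l sub : List Char) (j : Nat) (h1 : sub <+: l.drop j)
    (h2 : ∀ i < j, ¬ sub <+: l.drop i) : PySem.Chars.find l sub = (j : Int) := by
  have hin : PySem.Chars.isIn sub l = true :=
    (PySem.Chars.exists_prefix_drop_iff_isIn sub l).mp ⟨j, h1⟩
  have hnn : 0 ≤ PySem.Chars.find l sub :=
    (PySem.Chars.find_nonneg_iff l sub).mpr ((PySem.Chars.isIn_iff_infix sub l).mp hin)
  obtain ⟨hp, hmin⟩ := PySem.Chars.find_spec hnn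
  have : (PySem.Chars.find l sub).toNat = j := by
    rcases lt_trichotomy (PySem.Chars.find l sub).toNat j with h | h | h
    · exact absurd hp (h2 _ h)
    · exact h
    · exact absurd h1 (hmin j h)
  omega

-- go with maxsplit budget 0 returns immediately, whatever the fuel
theorem pv_go0 (sep : List Char) : ∀ (fuel : Nat) (l cur : List Char) (acc : List (List Char)),
    PySem.Chars.splitOnMax.go sep fuel 0 l cur acc = ((cur.reverse ++ l) :: acc).reverse := by
  intro fuel l cur acc
  cases fuel with
  | zero => simp [PySem.Chars.splitOnMax.go]
  | succ f => cases l with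
    | nil => simp [PySem.Chars.splitOnMax.go]
    | cons c rest => simp [PySem.Chars.splitOnMax.go]

-- splitOnMax.go with maxsplit 1 and empty accumulator, characterised by find
theorem pv_go1 (sep : List Char) (hsep : sep ≠ []) :
    ∀ (l : List Char) (fuel : Nat) (cur : List Char), l.length < fuel →
    PySem.Chars.splitOnMax.go sep fuel 1 l cur [] =
      if PySem.Chars.isIn sep l = true then
        [cur.reverse ++ l.take (PySem.Chars.find l sep).toNat,
         l.drop ((PySem.Chars.find l sep).toNat + sep.length)]
      else [cur.reverse ++ l] := by
  intro l
  induction l with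
  | nil =>
    intro fuel cur hf
    have hni : PySem.Chars.isIn sep [] = false := by
      rw [PySem.Chars.isIn_eq_false_iff]
      simp [hsep]
    cases fuel with
    | zero => omega
    | succ f => simp [PySem.Chars.splitOnMax.go, hni]
  | cons c rest ih =>
    intro fuel cur hf
    cases fuel with
    | zero => simp at hf
    | succ f =>
      by_cases hpre : sep.isPrefixOf (c :: rest) = true
      · have hp : sep <+: (c :: rest) := List.isPrefixOf_iff_prefix.mp hpre
        have hfind : PySem.Chars.find (c :: rest) sep = ((0 : Nat) : Int) :=
          pv_find_eq _ _ 0 (by simpa using hp) (by omega)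
        have hin : PySem.Chars.isIn sep (c :: rest) = true :=
          (PySem.Chars.exists_prefix_drop_iff_isIn sep (c :: rest)).mp ⟨0, by simpa using hp⟩
        simp [PySem.Chars.splitOnMax.go, hpre, pv_go0, hin, hfind]
      · have hnp : ¬ sep <+: (c :: rest) := fun h => hpre (List.isPrefixOf_iff_prefix.mpr h)
        have hstep : PySem.Chars.splitOnMax.go sep (f + 1) 1 (c :: rest) cur [] =
            PySem.Chars.splitOnMax.go sep f 1 rest (c :: cur) [] := by
          simp [PySem.Chars.splitOnMax.go, hpre]
        rw [hstep, ih f (c :: cur) (by simpa using Nat.lt_of_succ_lt_succ hf)]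
        by_cases hin : PySem.Chars.isIn sep rest = true
        · have hnn : 0 ≤ PySem.Chars.find rest sep :=
            (PySem.Chars.find_nonneg_iff rest sep).mpr ((PySem.Chars.isIn_iff_infix sep rest).mp hin)
          obtain ⟨hp, hmin⟩ := PySem.Chars.find_spec hnn
          set J := (PySem.Chars.find rest sep).toNat with hJ
          have hfind : PySem.Chars.find (c :: rest) sep = ((J + 1 : Nat) : Int) := by
            apply pv_find_eq
            · simpa using hp
            · intro i hi
              cases i with
              | zero => simpa using hnp
              | succ i' => simpa using hmin i' (by omega)
          have hin' : PySem.Chars.isIn sep (c :: rest) = true :=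
            (PySem.Chars.exists_prefix_drop_iff_isIn sep (c :: rest)).mp ⟨J + 1, by simpa using hp⟩
          simp only [hin, hin', hfind, if_true, Int.toNat_natCast, List.take_succ_cons,
            List.reverse_cons, List.append_assoc, List.singleton_append]
          rw [show J + 1 + sep.length = (J + sep.length) + 1 by omega, List.drop_succ_cons]
        · have hin' : PySem.Chars.isIn sep (c :: rest) = false := by
            rw [PySem.Chars.isIn_eq_false_iff]
            intro hinf
            obtain ⟨j, hj⟩ := (PySem.Chars.exists_prefix_drop_iff_isIn sep (c :: rest)).mpr
              ((PySem.Chars.isIn_iff_infix sep (c :: rest)).mpr hinf)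
            cases j with
            | zero => exact hnp (by simpa using hj)
            | succ j' =>
              have : PySem.Chars.isIn sep rest = true :=
                (PySem.Chars.exists_prefix_drop_iff_isIn sep rest).mp ⟨j', by simpa using hj⟩
              simp [this] at hin
          simp [hin, hin']

theorem pv_splitOnMax_one (l sep : List Char) (hsep : sep ≠ [])
    (hin : PySem.Chars.isIn sep l = true) :
    PySem.Chars.splitOnMax l sep 1 =
      [l.take (PySem.Chars.find l sep).toNat,
       l.drop ((PySem.Chars.find l sep).toNat + sep.length)] := by
  rw [PySem.Chars.splitOnMax]
  simp only [show ¬((1:Int) < 0) by norm_num, if_false]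
  rw [show ((1:Int)).toNat = 1 from rfl, pv_go1 sep hsep l (l.length + 1) [] (by omega)]
  simp [hin]

-- taking up to the first index satisfying p is takeWhile (!p)
theorem pv_take_findIdx (p : Char → Bool) (l : List Char) :
    l.take (l.findIdx p) = l.takeWhile (fun a => !p a) := by
  induction l with
  | nil => simp
  | cons c rest ih =>
    by_cases h : p c
    · simp [List.findIdx_cons, h]
    · simp [List.findIdx_cons, h, List.take_succ_cons, ih]

-- one end-marker pass of A's inner loop truncates at the first occurrence of that marker
theorem pv_step (c : Char) (pt : List Char) :
    (if PySem.Chars.isIn [c] pt = true then (PySem.Chars.splitOnMax pt [c] 1).headD [] else pt)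
      = pt.takeWhile (fun a => a != c) := by
  by_cases hin : PySem.Chars.isIn [c] pt = true
  · rw [if_pos hin, pv_splitOnMax_one pt [c] (by simp) hin]
    have hmem : c ∈ pt :=
      (List.singleton_infix_iff c pt).mp ((PySem.Chars.isIn_iff_infix [c] pt).mp hin)
    have hlt : pt.findIdx (fun a => a == c) < pt.length :=
      List.findIdx_lt_length.mpr ⟨c, hmem, by simp⟩
    have hfind : PySem.Chars.find pt [c] = ((pt.findIdx (fun a => a == c) : Nat) : Int) := by
      apply pv_find_eq
      · rw [List.drop_eq_getElem_cons hlt]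
        have hc : pt[pt.findIdx (fun a => a == c)] = c := by
          have := List.findIdx_getElem (p := fun a => a == c) (xs := pt) (w := hlt)
          simpa using this
        rw [hc]
        exact ⟨_, rfl⟩
      · intro i hi hpref
        have hlen : i < pt.length := lt_trans hi hlt
        rw [List.drop_eq_getElem_cons hlen] at hpref
        obtain ⟨t, ht⟩ := hpref
        have hci : pt[i] = c := by
          rw [List.singleton_append] at ht
          exact ((List.cons.injEq _ _ _ _).mp ht).1.symm
        have hfalse : (pt[i] == c) = false := List.not_of_lt_findIdx hi
        simp [hci] at hfalse
    rw [List.headD]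
    simp only [hfind, Int.toNat_natCast]
    rw [pv_take_findIdx (fun a => a == c) pt]
    simp [bne]
  · rw [if_neg hin]
    have hnm : c ∉ pt := by
      intro hmem
      exact hin ((PySem.Chars.isIn_iff_infix [c] pt).mpr ((List.singleton_infix_iff c pt).mpr hmem))
    symm
    rw [List.takeWhile_eq_self_iff]
    intro a ha
    simp [bne]
    exact fun h => hnm (h ▸ ha)

-- A's whole end-marker loop truncates at the first occurrence of ANY end marker
theorem pv_trimA (pt : List Char) :
    pvTrimA pt = pt.takeWhile (fun a => !pvMarkers.contains a) := by
  simp only [pvTrimA, pvEndMarkers, List.foldl_cons, List.foldl_nil]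
  rw [pv_step, pv_step, pv_step, pv_step, pv_step]
  rw [List.takeWhile_takeWhile, List.takeWhile_takeWhile, List.takeWhile_takeWhile,
    List.takeWhile_takeWhile]
  congr 1
  funext a
  rw [Bool.eq_iff_iff]
  simp [pvMarkers, bne]
  tauto

theorem pv_loop_eq : ∀ (inds : List (List Char)) (m : List Char),
    (∀ ind ∈ inds, ind ≠ []) → pvLoopA inds m = pvLoopB inds m := by
  intro inds
  induction inds with
  | nil => intro m _; rfl
  | cons ind rest ih =>
    intro m hne
    have hind : ind ≠ [] := hne ind (by simp)
    have hrest : ∀ i ∈ rest, i ≠ [] := fun i hi => hne i (by simp [hi])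
    by_cases hin : PySem.Chars.isIn ind m = true
    · have hnn : 0 ≤ PySem.Chars.find m ind :=
        (PySem.Chars.find_nonneg_iff m ind).mpr ((PySem.Chars.isIn_iff_infix ind m).mp hin)
      have hpos : ¬ PySem.Chars.find m ind < 0 := by omega
      rw [pvLoopA, pvLoopB]
      simp only [hin, if_true, hpos, if_false, pv_splitOnMax_one m ind hind hin]
      set J := (PySem.Chars.find m ind).toNat with hJ
      by_cases htail : PySem.Chars.strip (m.drop (J + ind.length)) = []
      · simp only [List.getD, List.getElem?_cons_succ, List.getElem?_cons_zero, Option.getD_some,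
          htail, ne_eq, not_true_eq_false, and_false, if_false, if_true]
        exact ih m hrest
      · simp only [List.getD, List.getElem?_cons_succ, List.getElem?_cons_zero, Option.getD_some,
          htail, ne_eq, not_false_eq_true, and_true, List.length_cons, List.length_nil,
          if_false, if_true, show (1:Nat) < 2 by omega]
        rw [pv_trimA, pv_take_findIdx (fun c => pvMarkers.contains c),
          PySem.List.slice_to _ (by norm_num : (0:Int) ≤ 50)]
        rfl
    · have hneg : PySem.Chars.find m ind < 0 := by
        have := PySem.Chars.find_eq_neg_one_iff m ind
        have hni : PySem.Chars.find m ind = -1 := by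
          rw [this]
          intro hinf
          exact hin ((PySem.Chars.isIn_iff_infix ind m).mpr hinf)
        omega
      rw [pvLoopA, pvLoopB]
      simp only [hin, hneg, if_true]
      exact ih m hrest

-- ===== VERDICT (by name: the statement is the Claim_ definition above) =====
theorem extract_product_service_spec : Claim_equal_extract_product_service := by
  intro message _
  unfold Spec_extract_product_service extract_product_service extract_product_service_alt
  exact pv_loop_eq pvIndicators _ (by decide)
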